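-- pv_equiv track=rewrite | github.com/flydecisive/studyPython | unsorted/remove_all_before.py | remove_all_before
-- ===== SOURCE A (Python) =====
-- def remove_all_before(items, border):
--     '''Функция удаляет все элементы до нужного элемента'''
--     if len(items) == 0:
--         answer = items
--     elif border not in items:
--         answer = items
--     else:
--         count = 0
--         while count != len(items):
--             if items[count] != border:
--                 items.pop(count)
--             elif items[count] == border:
--                 break
--         answer = items
--
--     return answer
-- ===== SOURCE B (Python) =====
-- def remove_all_before(items, border):
--     if len(items) == 0 or border not in items:
--         return items
--     items[:] = items[items.index(border):]
--     return items
-- ===== Notes on version B (the rewrite author's own statement) =====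
-- stated objective: idiomatic
-- what changed: A repeatedly pops the front element (each pop shifting the whole tail) until the border reaches the head; B locates the first border with list.index and keeps the suffix with one slice assignment.
import Mathlib
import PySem

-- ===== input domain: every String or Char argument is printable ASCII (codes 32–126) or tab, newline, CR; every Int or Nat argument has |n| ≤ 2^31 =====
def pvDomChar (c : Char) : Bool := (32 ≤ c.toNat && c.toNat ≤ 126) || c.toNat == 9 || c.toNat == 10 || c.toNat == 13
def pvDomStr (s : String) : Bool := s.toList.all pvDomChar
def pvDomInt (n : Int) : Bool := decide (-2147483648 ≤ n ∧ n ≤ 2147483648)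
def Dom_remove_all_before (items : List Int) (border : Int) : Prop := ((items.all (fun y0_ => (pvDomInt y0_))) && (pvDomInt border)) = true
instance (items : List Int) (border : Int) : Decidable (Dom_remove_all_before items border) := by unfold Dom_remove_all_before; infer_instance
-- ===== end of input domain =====

-- B keeps the suffix from the first border via index + slice assignment instead of A's repeated pop(0);
-- equivalence is about the return value; in Python both mutate `items` identically (B via items[:] = items[items.index(border):]).
-- ===== PORT A =====
-- the while loop: count stays 0; pop(0) while head != border, break when head == border
def removeAllBeforeLoopA (border : Int) : List Int → List Int
  | [] => []
  | h :: t => if h ≠ border then removeAllBeforeLoopA border t else h :: t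

def remove_all_before (items : List Int) (border : Int) : List Int :=
  if items.length = 0 then items
  else if ¬ items.contains border then items
  else removeAllBeforeLoopA border items

-- ===== PORT B =====
-- items[:] = items[items.index(border):]; the guard ensures index succeeds (none branch unreachable)
def remove_all_before_alt (items : List Int) (border : Int) : List Int :=
  if items.length = 0 ∨ ¬ items.contains border then items
  else
    match PySem.List.index? items border with
    | some i => PySem.List.slice items (some (i : Int)) none
    | none => items

-- ===== PRECONDITION & SPEC =====
def Spec_remove_all_before (items : List Int) (border : Int) (out : List Int) : Prop := out = remove_all_before_alt items border
instance (items : List Int) (border : Int) (out : List Int) : Decidable (Spec_remove_all_before items border out) := by unfold Spec_remove_all_before; infer_instance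

-- ===== CLAIM (what is proved, stated in full; the proofs are below) =====
def Claim_equal_remove_all_before : Prop := ∀ (items : List Int) (border : Int), Dom_remove_all_before items border → Spec_remove_all_before items border (remove_all_before items border)

-- ===== LEMMAS AND PROOFS =====

-- ===== VERDICT (by name: the statement is the Claim_ definition above) =====
lemma loopA_eq_index_slice (border : Int) (l : List Int) (hm : border ∈ l) :
    removeAllBeforeLoopA border l =
      (match PySem.List.index? l border with
       | some i => PySem.List.slice l (some (i : Int)) none
       | none => l) := by
  induction l with
  | nil => cases hm
  | cons h t ih =>
    by_cases hb : h = border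
    · subst hb
      rw [PySem.List.index?_cons_self]
      simp [removeAllBeforeLoopA]
    · have hmt : border ∈ t := by
        rcases List.mem_cons.mp hm with rfl | h1
        · exact absurd rfl hb
        · exact h1
      obtain ⟨i, hi⟩ := (PySem.List.index?_isSome_iff (xs := t) (v := border)).2 hmt
        |> Option.isSome_iff_exists.mp
      have step := PySem.List.index?_cons_of_ne (xs := t) (v := border) hb
      rw [removeAllBeforeLoopA, if_pos hb, ih hmt, hi, step, hi]
      simp only [Option.map_some]
      rw [PySem.List.slice_from_natCast, PySem.List.slice_from_natCast]
      simp

theorem remove_all_before_spec : Claim_equal_remove_all_before := by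
  intro items border _
  unfold Spec_remove_all_before remove_all_before remove_all_before_alt
  by_cases h0 : items.length = 0
  · simp [h0]
  · by_cases hc : border ∈ items
    · simp only [h0]
      simp [loopA_eq_index_slice border items hc]
    · simp [h0, hc]
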